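-- pv_equiv track=rewrite | github.com/Ashiq-am/Path-of-Python | 3.Data Types/Dictionary/Dictionary Articles/Count Weird Triplets/Example 1.py | check_triplets
-- ===== SOURCE A (Python) =====
-- def check_triplets(A):
--
-- 	# Variable to store length of A
--
-- 	n = len(A)
--
-- 	# Variable to store count of valid triplets
--
-- 	count = 0
--
-- 	# Loops for making combination all possible triplets
--
-- 	for i in range(n - 2):
--
-- 		for j in range(i + 1, n - 1):
--
-- 			for k in range(j + 1, n):
--
-- 				# Check if the triplet has at most 2 identical elements
--
-- 				if A[i] != A[j] or A[j] != A[k]: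
--
-- 					count += 1
--
-- 	return count
-- ===== SOURCE B (Python) =====
-- def check_triplets(A):
--     n = len(A)
--     total = n * (n - 1) * (n - 2) // 6
--     seen = {}
--     equal = 0
--     for x in A:
--         c = seen.get(x, 0)
--         equal += c * (c - 1) // 2
--         seen[x] = c + 1
--     return total - equal
-- ===== Notes on version B (the rewrite author's own statement) =====
-- stated objective: faster
-- what changed: Replaces the O(n^3) triple nested loop with a single pass keeping a frequency dict: answer = C(n,3) minus the number of all-equal triples, accumulated as C(c,2) per element over its count of earlier equal elements.
import Mathlib
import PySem

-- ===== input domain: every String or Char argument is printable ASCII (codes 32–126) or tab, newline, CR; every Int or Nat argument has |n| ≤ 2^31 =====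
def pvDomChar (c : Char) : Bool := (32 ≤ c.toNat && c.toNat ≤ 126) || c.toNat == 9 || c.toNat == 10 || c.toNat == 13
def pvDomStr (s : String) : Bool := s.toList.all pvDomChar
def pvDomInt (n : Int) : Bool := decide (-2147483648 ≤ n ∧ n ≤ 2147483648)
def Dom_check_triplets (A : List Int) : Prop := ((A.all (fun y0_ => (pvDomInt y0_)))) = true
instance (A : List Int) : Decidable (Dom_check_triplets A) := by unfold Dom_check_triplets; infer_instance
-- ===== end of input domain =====

-- B replaces A's O(n^3) triple loop by a one-pass frequency-dict computation: C(n,3) minus the count of all-equal triples.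

-- ===== PORT A =====
-- literal port of A's triple nested loop; A[i]/A[j]/A[k] are always in range, ported as pyGetD
def check_triplets (A : List Int) : Int :=
  let n : Int := (A.length : Int)
  let count : Int := 0
  let count := (PySem.List.pyRange 0 (n - 2) 1).foldl (fun count i =>
    (PySem.List.pyRange (i + 1) (n - 1) 1).foldl (fun count j =>
      (PySem.List.pyRange (j + 1) n 1).foldl (fun count k =>
        if PySem.List.pyGetD A i 0 ≠ PySem.List.pyGetD A j 0 ∨
           PySem.List.pyGetD A j 0 ≠ PySem.List.pyGetD A k 0
        then count + 1 else count) count) count) count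
  count

-- ===== PORT B =====
def check_triplets_alt (A : List Int) : Int :=
  let n : Int := (A.length : Int)
  let total : Int := PySem.Int.floordiv (n * (n - 1) * (n - 2)) 6
  let st := A.foldl (fun (st : PySem.Dict Int Int × Int) x =>
    let c := st.1.getD x 0
    (st.1.insert x (c + 1), st.2 + PySem.Int.floordiv (c * (c - 1)) 2))
    (PySem.Dict.empty, 0)
  total - st.2

-- ===== PRECONDITION & SPEC =====
def Spec_check_triplets (A : List Int) (out : Int) : Prop := out = check_triplets_alt A
instance (A : List Int) (out : Int) : Decidable (Spec_check_triplets A out) := by unfold Spec_check_triplets; infer_instance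

-- ===== CLAIM (what is proved, stated in full; the proofs are below) =====
def Claim_equal_check_triplets : Prop := ∀ (A : List Int), Dom_check_triplets A → Spec_check_triplets A (check_triplets A)

-- ===== LEMMAS AND PROOFS =====

-- number of k-positions completing a not-all-equal triple with fixed first two values x, y
-- (A's innermost loop), then the pair/triple counts of A's middle and outer loops
def pairCnt (x : Int) : List Int → Int
  | [] => 0
  | y :: ys => (ys.countP (fun z => decide (x ≠ y ∨ y ≠ z)) : Int) + pairCnt x ys

def tripCnt : List Int → Int
  | [] => 0
  | x :: xs => pairCnt x xs + tripCnt xs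

-- number of all-equal triples i < j < k (first-element decomposition)
def eqTripN : List Int → Nat
  | [] => 0
  | x :: xs => (xs.count x).choose 2 + eqTripN xs

lemma two_mul_choose_two (n : Nat) : 2 * (n + 1).choose 2 = (n + 1) * n := by
  induction n with
  | zero => rfl
  | succ m ih =>
    rw [Nat.choose_succ_succ' (m + 1) 1, Nat.choose_one_right]
    nlinarith [ih]

lemma six_mul_choose_three (n : Nat) : 6 * (n + 2).choose 3 = (n + 2) * (n + 1) * n := by
  induction n with
  | zero => rfl
  | succ m ih =>
    rw [Nat.choose_succ_succ' (m + 2) 2]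
    have h2 := two_mul_choose_two (m + 1)
    nlinarith [ih, h2]

lemma floordiv_choose_two (m : Nat) :
    PySem.Int.floordiv ((m : Int) * ((m : Int) - 1)) 2 = (m.choose 2 : Int) := by
  rw [PySem.Int.floordiv_eq_ediv_of_pos (by omega)]
  have h : (m : Int) * ((m : Int) - 1) = 2 * (m.choose 2 : Int) := by
    rcases m with _ | m
    · simp
    · have h2 := two_mul_choose_two m
      have hr : ((m + 1 : Nat) : Int) * (((m + 1 : Nat) : Int) - 1)
          = (((m + 1) * m : Nat) : Int) := by push_cast; ring
      rw [hr, ← h2]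
      push_cast; ring
  rw [h, Int.mul_ediv_cancel_left _ (by omega)]

lemma floordiv_choose_three (n : Nat) :
    PySem.Int.floordiv ((n : Int) * ((n : Int) - 1) * ((n : Int) - 2)) 6 = (n.choose 3 : Int) := by
  rw [PySem.Int.floordiv_eq_ediv_of_pos (by omega)]
  have h : (n : Int) * ((n : Int) - 1) * ((n : Int) - 2) = 6 * (n.choose 3 : Int) := by
    rcases n with _ | _ | k
    · simp
    · norm_num
    · have h6 := six_mul_choose_three k
      have hr : ((k + 2 : Nat) : Int) * (((k + 2 : Nat) : Int) - 1) * (((k + 2 : Nat) : Int) - 2)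
          = (((k + 2) * (k + 1) * k : Nat) : Int) := by push_cast; ring
      rw [hr, ← h6]
      push_cast; ring
  rw [h, Int.mul_ediv_cancel_left _ (by omega)]

lemma pairCnt_closed (x : Int) (xs : List Int) :
    pairCnt x xs = (xs.length.choose 2 : Int) - ((xs.count x).choose 2 : Int) := by
  induction xs with
  | nil => simp [pairCnt]
  | cons y ys ih =>
    rw [pairCnt, ih]
    by_cases hxy : x = y
    · subst hxy
      have hp : ys.countP (fun z => decide (x ≠ x ∨ x ≠ z)) = ys.length - ys.count x := by
        have h1 : ys.countP (fun z => decide (x ≠ x ∨ x ≠ z))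
            = ys.countP (fun z => decide (¬ (z == x) = true)) := by
          apply List.countP_congr
          intro z _
          by_cases h : z = x
          · subst h; simp
          · simp [h, Ne.symm h]
        rw [h1]
        have h2 := List.length_eq_countP_add_countP (fun z => z == x) (l := ys)
        have h3 : ys.count x = ys.countP (fun z => z == x) := rfl
        omega
      rw [hp]
      have hc : (x :: ys).count x = ys.count x + 1 := by simp
      rw [hc]
      have hle : ys.count x ≤ ys.length := List.count_le_length
      have h4 : (ys.length + 1).choose 2 = ys.length + ys.length.choose 2 := by
        rw [Nat.choose_succ_succ' ys.length 1, Nat.choose_one_right]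
      have h5 : (ys.count x + 1).choose 2 = ys.count x + (ys.count x).choose 2 := by
        rw [Nat.choose_succ_succ' (ys.count x) 1, Nat.choose_one_right]
      simp only [List.length_cons]
      push_cast [h4, h5]
      omega
    · have hp : ys.countP (fun z => decide (x ≠ y ∨ y ≠ z)) = ys.length := by
        rw [List.countP_eq_length]
        intro z _
        simp [hxy]
      rw [hp]
      have hc : (y :: ys).count x = ys.count x := by simp [Ne.symm hxy]
      rw [hc]
      have h4 : (ys.length + 1).choose 2 = ys.length + ys.length.choose 2 := by
        rw [Nat.choose_succ_succ' ys.length 1, Nat.choose_one_right]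
      simp only [List.length_cons]
      push_cast [h4]
      ring

lemma tripCnt_closed (xs : List Int) :
    tripCnt xs = (xs.length.choose 3 : Int) - (eqTripN xs : Int) := by
  induction xs with
  | nil => simp [tripCnt, eqTripN]
  | cons x ys ih =>
    rw [tripCnt, eqTripN, ih, pairCnt_closed]
    have h1 : (ys.length + 1).choose 3 = ys.length.choose 2 + ys.length.choose 3 :=
      Nat.choose_succ_succ' ys.length 2
    simp only [List.length_cons]
    push_cast [h1]
    ring

lemma eqTripN_append_singleton (p : List Int) (x : Int) :
    eqTripN (p ++ [x]) = eqTripN p + (p.count x).choose 2 := by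
  induction p with
  | nil => simp [eqTripN]
  | cons y p ih =>
    rw [List.cons_append, eqTripN, eqTripN, ih, List.count_append, List.count_cons]
    by_cases h : y = x
    · subst h
      simp
      omega
    · simp [h, Ne.symm h]
      omega

lemma scan_equal (xs : List Int) :
    ∀ (d : PySem.Dict Int Int) (e : Int) (p : List Int),
      (∀ v, d.getD v 0 = (p.count v : Int)) →
      (xs.foldl (fun (st : PySem.Dict Int Int × Int) x =>
        (st.1.insert x (st.1.getD x 0 + 1),
         st.2 + PySem.Int.floordiv (st.1.getD x 0 * (st.1.getD x 0 - 1)) 2)) (d, e)).2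
      = e + ((eqTripN (p ++ xs) : Int) - (eqTripN p : Int)) := by
  induction xs with
  | nil => intro d e p _; simp
  | cons x xs ih =>
    intro d e p hd
    rw [List.foldl_cons]
    have hc : d.getD x 0 = (p.count x : Int) := hd x
    have hinv : ∀ v, (d.insert x (d.getD x 0 + 1)).getD v 0 = ((p ++ [x]).count v : Int) := by
      intro v
      rw [PySem.Dict.getD_insert]
      by_cases h : v = x
      · rw [if_pos h, hc, h]
        have h1 : [x].count x = 1 := by simp
        rw [List.count_append, h1]
        push_cast; ring
      · rw [if_neg h, hd v]
        have h1 : [x].count v = 0 := by simp [Ne.symm h]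
        rw [List.count_append, h1]
        omega
    rw [ih _ _ (p ++ [x]) hinv, hc, floordiv_choose_two]
    have h1 : eqTripN (p ++ [x]) = eqTripN p + (p.count x).choose 2 :=
      eqTripN_append_singleton p x
    have h2 : (p ++ [x]) ++ xs = p ++ (x :: xs) := by simp
    rw [h2, h1]
    push_cast
    ring

lemma pairCnt_short (x : Int) (xs : List Int) (h : xs.length ≤ 1) : pairCnt x xs = 0 := by
  match xs, h with
  | [], _ => rfl
  | [a], _ => simp [pairCnt]

lemma tripCnt_short (xs : List Int) (h : xs.length ≤ 2) : tripCnt xs = 0 := by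
  match xs, h with
  | [], _ => rfl
  | [a], _ => simp [tripCnt, pairCnt]
  | [a, b], _ => simp [tripCnt, pairCnt]

-- A's middle loop (for a fixed first element value x) counts pairCnt on the suffix
lemma mid_loop (A : List Int) (x : Int) :
    ∀ (m : Nat) (j acc : Int), 0 ≤ j → (A.length : Int) - 1 - j ≤ (m : Int) →
      (PySem.List.pyRange j ((A.length : Int) - 1) 1).foldl (fun c j' =>
        (PySem.List.pyRange (j' + 1) (A.length : Int) 1).foldl (fun c k =>
          if x ≠ PySem.List.pyGetD A j' 0 ∨
             PySem.List.pyGetD A j' 0 ≠ PySem.List.pyGetD A k 0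
          then c + 1 else c) c) acc
      = acc + pairCnt x (A.drop j.toNat) := by
  intro m
  induction m with
  | zero =>
    intro j acc hj hm
    rw [PySem.List.pyRange_one_eq_nil (by omega)]
    rw [pairCnt_short x _ (by
      have := List.length_drop (l := A) (i := j.toNat)
      omega)]
    simp
  | succ m ih =>
    intro j acc hj hm
    by_cases hend : (A.length : Int) - 1 ≤ j
    · rw [PySem.List.pyRange_one_eq_nil (by omega)]
      rw [pairCnt_short x _ (by
        have := List.length_drop (l := A) (i := j.toNat)
        omega)]
      simp
    · rw [PySem.List.pyRange_one_cons (by omega), List.foldl_cons]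
      rw [PySem.List.foldl_pyRange_pyGetD' A 0
        (fun c z => if x ≠ PySem.List.pyGetD A j 0 ∨ PySem.List.pyGetD A j 0 ≠ z then c + 1 else c)
        acc (by omega)]
      rw [PySem.List.foldl_ite_add_one
        (fun z => x ≠ PySem.List.pyGetD A j 0 ∨ PySem.List.pyGetD A j 0 ≠ z)]
      rw [ih (j+1) _ (by omega) (by omega)]
      have hjlt : j.toNat < A.length := by omega
      have hdrop : A.drop j.toNat = A[j.toNat] :: A.drop (j.toNat + 1) :=
        List.drop_eq_getElem_cons hjlt
      have hj1 : (j + 1).toNat = j.toNat + 1 := by omega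
      have hy : PySem.List.pyGetD A j 0 = A[j.toNat] :=
        PySem.List.pyGetD_eq_getElem A 0 hj (by omega)
      rw [hj1, hdrop, pairCnt, hy]
      ring

lemma outer_loop (A : List Int) :
    ∀ (m : Nat) (i acc : Int), 0 ≤ i → (A.length : Int) - 2 - i ≤ (m : Int) →
      (PySem.List.pyRange i ((A.length : Int) - 2) 1).foldl (fun c i' =>
        (PySem.List.pyRange (i' + 1) ((A.length : Int) - 1) 1).foldl (fun c j =>
          (PySem.List.pyRange (j + 1) (A.length : Int) 1).foldl (fun c k =>
            if PySem.List.pyGetD A i' 0 ≠ PySem.List.pyGetD A j 0 ∨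
               PySem.List.pyGetD A j 0 ≠ PySem.List.pyGetD A k 0
            then c + 1 else c) c) c) acc
      = acc + tripCnt (A.drop i.toNat) := by
  intro m
  induction m with
  | zero =>
    intro i acc hi hm
    rw [PySem.List.pyRange_one_eq_nil (by omega)]
    rw [tripCnt_short _ (by
      have := List.length_drop (l := A) (i := i.toNat)
      omega)]
    simp
  | succ m ih =>
    intro i acc hi hm
    by_cases hend : (A.length : Int) - 2 ≤ i
    · rw [PySem.List.pyRange_one_eq_nil (by omega)]
      rw [tripCnt_short _ (by
        have := List.length_drop (l := A) (i := i.toNat)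
        omega)]
      simp
    · rw [PySem.List.pyRange_one_cons (by omega), List.foldl_cons]
      rw [mid_loop A (PySem.List.pyGetD A i 0) A.length (i+1) acc (by omega) (by omega)]
      rw [ih (i+1) _ (by omega) (by omega)]
      have hilt : i.toNat < A.length := by omega
      have hdrop : A.drop i.toNat = A[i.toNat] :: A.drop (i.toNat + 1) :=
        List.drop_eq_getElem_cons hilt
      have hi1 : (i + 1).toNat = i.toNat + 1 := by omega
      have hx : PySem.List.pyGetD A i 0 = A[i.toNat] :=
        PySem.List.pyGetD_eq_getElem A 0 hi (by omega)
      rw [hi1, hdrop, tripCnt, hx]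
      ring

lemma portA_eq (A : List Int) : check_triplets A = tripCnt A := by
  have hA := outer_loop A A.length 0 0 le_rfl (by omega)
  simp only [Int.toNat_zero, List.drop_zero, zero_add] at hA
  simp only [check_triplets]
  rw [hA]

lemma portB_eq (A : List Int) :
    check_triplets_alt A = (A.length.choose 3 : Int) - (eqTripN A : Int) := by
  have hB := scan_equal A PySem.Dict.empty 0 [] (by intro v; simp)
  simp only [List.nil_append, eqTripN, Nat.cast_zero, sub_zero, zero_add] at hB
  simp only [check_triplets_alt]
  rw [hB, floordiv_choose_three A.length]

-- ===== VERDICT (by name: the statement is the Claim_ definition above) =====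
theorem check_triplets_spec : Claim_equal_check_triplets := by
  intro A _
  unfold Spec_check_triplets
  rw [portA_eq, portB_eq, tripCnt_closed]
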